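-- pv_equiv track=rewrite | github.com/sijae24/mountain-madness-26 | spotify.py | _extract_lastfm_image
-- ===== SOURCE A (Python) =====
-- def _extract_lastfm_image(images):
--     if not isinstance(images, list):
--         return None
--     for img in reversed(images):
--         src = (img or {}).get("#text", "").strip()
--         if src:
--             return src
--     return None
-- ===== SOURCE B (Python) =====
-- def _extract_lastfm_image(images):
--     if not isinstance(images, list):
--         return None
--     valid = [s for img in images if (s := (img or {}).get("#text", "").strip())]
--     return valid[-1] if valid else None
-- ===== Notes on version B (the rewrite author's own statement) =====
-- stated objective: alternative
-- what changed: Replaces the reversed-iteration-with-early-return by a single forward pass that collects all non-empty trimmed '#text' values and then selects the last one.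
import Mathlib
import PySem

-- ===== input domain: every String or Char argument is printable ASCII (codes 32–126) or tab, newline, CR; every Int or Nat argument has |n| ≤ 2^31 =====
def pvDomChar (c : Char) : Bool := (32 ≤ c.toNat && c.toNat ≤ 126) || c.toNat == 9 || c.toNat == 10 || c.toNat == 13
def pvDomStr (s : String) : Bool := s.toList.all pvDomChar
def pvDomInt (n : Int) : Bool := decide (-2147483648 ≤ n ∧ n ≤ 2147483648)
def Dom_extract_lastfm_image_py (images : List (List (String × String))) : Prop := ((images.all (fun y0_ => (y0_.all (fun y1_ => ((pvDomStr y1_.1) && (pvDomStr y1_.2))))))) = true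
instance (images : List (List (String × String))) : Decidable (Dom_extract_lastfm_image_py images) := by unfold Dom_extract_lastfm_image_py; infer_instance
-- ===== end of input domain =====

-- ===== PORT A =====
-- B is an alternative same-cost decomposition: forward collect-then-select instead of reversed early-return.
-- loop 'for img in reversed(images): src = (img or {}).get("#text","").strip(); if src: return src' / 'return None'
def pvFindA_extract : List (List (String × String)) → Option String
  | [] => none
  | img :: rest =>
    let src := PySem.Str.strip (PySem.Dict.getD (PySem.Dict.mk img) "#text" "")
    if src = "" then pvFindA_extract rest else some src

-- isinstance(images, list) is always true under the Lean type, so the guard is vacuous here.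
def extract_lastfm_image_py (images : List (List (String × String))) : Option String :=
  pvFindA_extract images.reverse

-- ===== PORT B =====
def extract_lastfm_image_py_alt (images : List (List (String × String))) : Option String :=
  let valid := images.filterMap (fun img =>
    let s := PySem.Str.strip (PySem.Dict.getD (PySem.Dict.mk img) "#text" "")
    if s = "" then none else some s)
  valid.getLast?

-- ===== PRECONDITION & SPEC =====

def Spec_extract_lastfm_image_py (images : List (List (String × String))) (out : Option String) : Prop := out = extract_lastfm_image_py_alt images
instance (images : List (List (String × String))) (out : Option String) : Decidable (Spec_extract_lastfm_image_py images out) := by unfold Spec_extract_lastfm_image_py; infer_instance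

-- ===== CLAIM (what is proved, stated in full; the proofs are below) =====
def Claim_equal_extract_lastfm_image_py : Prop := ∀ (images : List (List (String × String))), Dom_extract_lastfm_image_py images → Spec_extract_lastfm_image_py images (extract_lastfm_image_py images)

-- ===== LEMMAS AND PROOFS =====

-- ===== VERDICT (by name: the statement is the Claim_ definition above) =====
lemma pvFindA_eq_head?_filterMap (l : List (List (String × String))) :
    pvFindA_extract l = (l.filterMap (fun img =>
      let s := PySem.Str.strip (PySem.Dict.getD (PySem.Dict.mk img) "#text" "")
      if s = "" then none else some s)).head? := by
  induction l with
  | nil => rfl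
  | cons img rest ih =>
      simp only [pvFindA_extract, List.filterMap_cons]
      split <;> simp [ih]

theorem extract_lastfm_image_py_spec : Claim_equal_extract_lastfm_image_py := by
  intro images _
  show extract_lastfm_image_py images = extract_lastfm_image_py_alt images
  unfold extract_lastfm_image_py extract_lastfm_image_py_alt
  rw [pvFindA_eq_head?_filterMap, List.filterMap_reverse, List.head?_reverse]
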